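-- pv_equiv track=rewrite | github.com/StarWarsSimba/waldo-mini | waldo.py | all_col_exists_waldo
-- ===== SOURCE A (Python) =====
-- Waldo = 'W'
--
-- def all_col_exists_waldo(matrix: list[list[str]]) -> bool:
--     """For all columns in the matrix, there exists a Waldo in the column"""
--     diff_columns = []
--     for row in range(len(matrix)):
--         for col in range(len(matrix[row])):
--             if matrix[row][col] == Waldo and col not in diff_columns:
--                 diff_columns.append(col)
--         if len(diff_columns) != len(matrix[row]) and row == len(matrix) - 1:
--             return False
--     return True
-- ===== SOURCE B (Python) =====
-- Waldo = 'W'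
--
-- def all_col_exists_waldo(matrix: list[list[str]]) -> bool:
--     """For all columns in the matrix, there exists a Waldo in the column"""
--     if not matrix:
--         return True
--     width = max(len(row) for row in matrix)
--     return all(
--         any(c < len(row) and row[c] == Waldo for row in matrix)
--         for c in range(width)
--     )
-- ===== Notes on version B (the rewrite author's own statement) =====
-- stated objective: alternative
-- what changed: Row-major pass growing a seen-columns list with linear membership tests is replaced by a column-major all/any scan over the full matrix width that keeps no state and short-circuits on the first uncovered column.
-- intended difference: On ragged matrices whose last row's length differs from the widest row's and where the number of distinct Waldo-holding columns equals either of those two lengths, A compares that count against the last row's length (an accident of running its check inside the loop at the final row) while B checks that every column up to the true matrix width holds a Waldo, which is the intended 'all columns' reading. — e.g. on all_col_exists_waldo([["W"], []]): A returns false, B returns true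
import Mathlib
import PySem

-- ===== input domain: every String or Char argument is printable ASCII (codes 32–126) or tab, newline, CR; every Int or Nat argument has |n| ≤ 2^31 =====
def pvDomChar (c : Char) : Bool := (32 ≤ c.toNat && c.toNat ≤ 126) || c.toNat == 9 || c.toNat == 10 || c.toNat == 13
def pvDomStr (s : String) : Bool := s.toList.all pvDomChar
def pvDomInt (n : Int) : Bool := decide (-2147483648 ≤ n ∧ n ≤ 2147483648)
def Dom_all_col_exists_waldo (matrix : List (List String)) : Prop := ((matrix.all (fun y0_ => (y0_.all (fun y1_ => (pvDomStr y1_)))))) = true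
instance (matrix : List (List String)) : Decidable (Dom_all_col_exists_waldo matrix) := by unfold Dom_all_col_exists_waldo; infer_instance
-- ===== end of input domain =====

-- B replaces A's row-major seen-columns-list pass by a stateless column-major all/any scan over the full
-- matrix width; on ragged matrices where A's compare-to-last-row-length is an accident, B checks the true
-- width (intended difference stated in D_ below).


-- ===== PORT A =====
-- inner loop: for col in range(len(row)): if row[col] == 'W' and col not in diff: diff.append(col)
def pvStepA (diff : List Nat) (r : List String) : List Nat :=
  (List.range r.length).foldl
    (fun d col => if r.getD col "" == "W" && !(d.contains col) then d ++ [col] else d) diff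

-- outer loop over row indices k, with the early `return False` at the last row
def pvGoA (m : Nat) (rows : List (List String)) (k : Nat) (diff : List Nat) : Bool :=
  match rows with
  | [] => true
  | r :: rest =>
    let diff' := pvStepA diff r
    if diff'.length != r.length && k == m - 1 then false
    else pvGoA m rest (k + 1) diff'

def all_col_exists_waldo (matrix : List (List String)) : Bool :=
  pvGoA matrix.length matrix 0 []

-- ===== PORT B =====
def all_col_exists_waldo_alt (matrix : List (List String)) : Bool :=
  if matrix.isEmpty then true
  else
    let width := (matrix.map List.length).foldl Nat.max 0
    (List.range width).all
      (fun c => matrix.any (fun row => decide (c < row.length) && row.getD c "" == "W"))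

-- ===== PRECONDITION & SPEC =====
-- helpers for D_: the matrix width and the number of distinct columns holding a Waldo
def pvWaldoWidth (matrix : List (List String)) : Nat :=
  (matrix.map (fun r => r.length)).foldr Nat.max 0

def pvWaldoCols (matrix : List (List String)) : Nat :=
  (List.range (pvWaldoWidth matrix)).countP
    (fun c => decide (∃ row ∈ matrix, c < row.length ∧ row.getD c "" = "W"))

-- On ragged matrices whose last row's length differs from the widest row's and where the number of
-- distinct Waldo-holding columns equals either of those two lengths, A compares that count against the
-- last row's length (an accident of running its check inside the loop at the final row) while B checks
-- every column up to the true matrix width, which is the intended "all columns" reading.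
def D_all_col_exists_waldo (matrix : List (List String)) : Prop :=
  matrix ≠ [] ∧ (matrix.getLastD []).length ≠ pvWaldoWidth matrix ∧
    (pvWaldoCols matrix = (matrix.getLastD []).length ∨ pvWaldoCols matrix = pvWaldoWidth matrix)
instance (matrix : List (List String)) : Decidable (D_all_col_exists_waldo matrix) := by
  unfold D_all_col_exists_waldo; infer_instance

def Spec_all_col_exists_waldo (matrix : List (List String)) (out : Bool) : Prop :=
  ¬ D_all_col_exists_waldo matrix → out = all_col_exists_waldo_alt matrix
instance (matrix : List (List String)) (out : Bool) : Decidable (Spec_all_col_exists_waldo matrix out) := by unfold Spec_all_col_exists_waldo; infer_instance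

def pvDiffWitness_all_col_exists_waldo : List (List String) := [["W"], []]
def pvDiffWitnessOut_all_col_exists_waldo : Bool × Bool := (false, true)

-- ===== CLAIM (what is proved, stated in full; the proofs are below) =====
def Claim_unchanged_all_col_exists_waldo : Prop := ∀ (matrix : List (List String)), Dom_all_col_exists_waldo matrix → Spec_all_col_exists_waldo matrix (all_col_exists_waldo matrix)
def Claim_changed_all_col_exists_waldo : Prop := Dom_all_col_exists_waldo (pvDiffWitness_all_col_exists_waldo) ∧ D_all_col_exists_waldo (pvDiffWitness_all_col_exists_waldo) ∧ all_col_exists_waldo (pvDiffWitness_all_col_exists_waldo) = pvDiffWitnessOut_all_col_exists_waldo.1 ∧ all_col_exists_waldo_alt (pvDiffWitness_all_col_exists_waldo) = pvDiffWitnessOut_all_col_exists_waldo.2 ∧ pvDiffWitnessOut_all_col_exists_waldo.1 ≠ pvDiffWitnessOut_all_col_exists_waldo.2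
def Claim_exact_all_col_exists_waldo : Prop := ∀ (matrix : List (List String)), Dom_all_col_exists_waldo matrix → D_all_col_exists_waldo matrix → all_col_exists_waldo matrix ≠ all_col_exists_waldo_alt matrix

-- ===== LEMMAS AND PROOFS =====

-- "column c holds a Waldo somewhere in the matrix"
def pvHasW (matrix : List (List String)) (c : Nat) : Prop :=
  ∃ r ∈ matrix, c < r.length ∧ r.getD c "" = "W"

lemma pvStepA_core_mem (r : List String) (L : List Nat) (diff : List Nat) (x : Nat) :
    x ∈ L.foldl (fun d col => if r.getD col "" == "W" && !(d.contains col) then d ++ [col] else d) diff ↔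
      x ∈ diff ∨ (x ∈ L ∧ r.getD x "" = "W") := by
  induction L generalizing diff with
  | nil => simp
  | cons a L ih =>
    simp only [List.foldl_cons, ih, List.mem_cons]
    by_cases hW : r.getD a "" = "W" <;> by_cases hm : a ∈ diff <;>
      simp [hm] <;> constructor <;> rintro h <;> aesop

lemma pvStepA_core_nodup (r : List String) (L : List Nat) (diff : List Nat)
    (h : diff.Nodup) :
    (L.foldl (fun d col => if r.getD col "" == "W" && !(d.contains col) then d ++ [col] else d) diff).Nodup := by
  induction L generalizing diff with
  | nil => exact h
  | cons a L ih =>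
    simp only [List.foldl_cons]
    apply ih
    by_cases hc : (r.getD a "" == "W" && !(diff.contains a)) = true
    · rw [if_pos hc]
      have ha : a ∉ diff := by
        rcases Bool.and_eq_true .. ▸ hc with ⟨_, hnc⟩
        simpa using hnc
      exact h.append (List.nodup_singleton a)
        (by simpa [List.disjoint_singleton] using ha)
    · rw [if_neg hc]; exact h

lemma pvStepA_mem (diff : List Nat) (r : List String) (x : Nat) :
    x ∈ pvStepA diff r ↔ x ∈ diff ∨ (x < r.length ∧ r.getD x "" = "W") := by
  unfold pvStepA
  rw [pvStepA_core_mem]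
  simp only [List.mem_range]

lemma pvStepA_nodup (diff : List Nat) (r : List String) (h : diff.Nodup) :
    (pvStepA diff r).Nodup := pvStepA_core_nodup _ _ _ h

lemma pvAccum_mem (rows : List (List String)) (diff : List Nat) (x : Nat) :
    x ∈ rows.foldl pvStepA diff ↔ x ∈ diff ∨ pvHasW rows x := by
  induction rows generalizing diff with
  | nil => simp [pvHasW]
  | cons r rest ih =>
    simp only [List.foldl_cons, ih, pvStepA_mem, pvHasW, List.mem_cons]
    constructor
    · rintro (((h | h) | h) | h) <;> aesop
    · rintro (h | ⟨rr, (rfl | hr), h1, h2⟩) <;> aesop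

lemma pvAccum_nodup (rows : List (List String)) (diff : List Nat) (h : diff.Nodup) :
    (rows.foldl pvStepA diff).Nodup := by
  induction rows generalizing diff with
  | nil => exact h
  | cons r rest ih => exact ih _ (pvStepA_nodup _ _ h)

-- characterisation of A's outer loop (on a nonempty suffix placed at row indices k, k+1, …)
lemma pvGoA_spec (rows : List (List String)) (m k : Nat) (diff : List Nat)
    (hne : rows ≠ []) (hk : k + rows.length = m) :
    pvGoA m rows k diff =
      ((rows.foldl pvStepA diff).length == (rows.getLastD []).length) := by
  induction rows generalizing k diff with
  | nil => exact absurd rfl hne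
  | cons r rest ih =>
    cases rest with
    | nil =>
      have hk1 : k + 1 = m := by simpa using hk
      have hkm : k = m - 1 := by omega
      show (if ((pvStepA diff r).length != r.length && k == m - 1) = true then false
        else pvGoA m [] (k + 1) (pvStepA diff r)) = _
      by_cases h : (pvStepA diff r).length = r.length <;>
        simp [pvGoA, h, hkm, List.getLastD]
    | cons r2 rest' =>
      have hk2 : k ≠ m - 1 := by simp at hk; omega
      have step : pvGoA m (r :: r2 :: rest') k diff
          = pvGoA m (r2 :: rest') (k + 1) (pvStepA diff r) := by
        show (if ((pvStepA diff r).length != r.length && k == m - 1) = true then false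
          else pvGoA m (r2 :: rest') (k + 1) (pvStepA diff r)) = _
        rw [if_neg (by simp [hk2])]
      rw [step, ih _ _ (by simp) (by simp at hk ⊢; omega)]
      simp

lemma pvFoldlMax_eq_max_foldr (l : List Nat) (b : Nat) :
    l.foldl Nat.max b = Nat.max b (l.foldr Nat.max 0) := by
  induction l generalizing b with
  | nil => simp
  | cons x l ih => simp [List.foldl_cons, List.foldr_cons, ih, Nat.max_assoc]

lemma pvWidth_eq (matrix : List (List String)) :
    (matrix.map List.length).foldl Nat.max 0 = pvWaldoWidth matrix := by
  unfold pvWaldoWidth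
  rw [pvFoldlMax_eq_max_foldr]
  simp

lemma pvFoldlMax_le_init (l : List Nat) (b : Nat) : b ≤ l.foldl Nat.max b := by
  induction l generalizing b with
  | nil => simp
  | cons x l ih => exact le_trans (Nat.le_max_left b x) (ih _)

lemma pvMax_le : ∀ (l : List Nat) (b a : Nat), a ∈ l → a ≤ l.foldl Nat.max b
  | x :: l, b, a, ha => by
    rcases List.mem_cons.mp ha with rfl | h
    · exact le_trans (Nat.le_max_right b a) (pvFoldlMax_le_init l _)
    · exact pvMax_le l _ a h

lemma pvHasW_lt_width (matrix : List (List String)) (c : Nat) (h : pvHasW matrix c) :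
    c < pvWaldoWidth matrix := by
  obtain ⟨r, hr, hlt, _⟩ := h
  rw [← pvWidth_eq]
  exact lt_of_lt_of_le hlt (pvMax_le _ _ _ (List.mem_map_of_mem hr))

-- A's distinct-columns list has exactly pvWaldoCols elements
lemma pvALen_eq (matrix : List (List String)) :
    (matrix.foldl pvStepA []).length = pvWaldoCols matrix := by
  unfold pvWaldoCols
  rw [List.countP_eq_length_filter]
  apply List.Perm.length_eq
  rw [List.perm_ext_iff_of_nodup (pvAccum_nodup _ _ List.nodup_nil)
    (List.Nodup.filter _ List.nodup_range)]
  intro a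
  rw [pvAccum_mem]
  simp only [List.mem_filter, List.mem_range, decide_eq_true_eq, List.not_mem_nil, false_or]
  constructor
  · intro h; exact ⟨pvHasW_lt_width _ _ h, h⟩
  · rintro ⟨_, h⟩; exact h

-- A computes: distinct-Waldo-column count == last row length
lemma pvA_char (matrix : List (List String)) :
    all_col_exists_waldo matrix
      = (pvWaldoCols matrix == (matrix.getLastD []).length) := by
  unfold all_col_exists_waldo
  cases matrix with
  | nil => simp [pvGoA, pvWaldoCols, pvWaldoWidth]
  | cons r rest =>
    rw [pvGoA_spec _ _ _ _ (by simp) (by simp), pvALen_eq]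

lemma pvCountP_range_full (w : Nat) (q : Nat → Bool) :
    List.countP q (List.range w) = w ↔ ∀ c ∈ List.range w, q c = true := by
  simpa using List.countP_eq_length (p := q) (l := List.range w)

-- B computes: distinct-Waldo-column count == matrix width
lemma pvB_char (matrix : List (List String)) :
    all_col_exists_waldo_alt matrix
      = (pvWaldoCols matrix == pvWaldoWidth matrix) := by
  unfold all_col_exists_waldo_alt
  cases matrix with
  | nil => simp [pvWaldoCols, pvWaldoWidth]
  | cons r rest =>
    simp only [List.isEmpty_cons, if_neg (by simp : ¬ false = true)]
    rw [pvWidth_eq]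
    unfold pvWaldoCols
    rw [Bool.eq_iff_iff, beq_iff_eq, pvCountP_range_full]
    simp only [List.all_eq_true, List.any_eq_true, Bool.and_eq_true, decide_eq_true_eq,
      beq_iff_eq, List.mem_range]

-- ===== VERDICT (by name: the statements are the Claim_ definitions above) =====
theorem all_col_exists_waldo_spec : Claim_unchanged_all_col_exists_waldo := by
  intro matrix _ hD
  rw [pvA_char, pvB_char]
  unfold D_all_col_exists_waldo at hD
  cases matrix with
  | nil => simp [pvWaldoCols, pvWaldoWidth]
  | cons r rest =>
    push Not at hD
    rcases Decidable.em ((((r :: rest).getLastD []).length) = pvWaldoWidth (r :: rest)) with h | h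
    · rw [h]
    · have := hD (by simp) h
      rw [Bool.eq_iff_iff]
      simp only [beq_iff_eq]
      omega

theorem all_col_exists_waldo_changed : Claim_changed_all_col_exists_waldo := by
  unfold Claim_changed_all_col_exists_waldo; decide

theorem all_col_exists_waldo_tight : Claim_exact_all_col_exists_waldo := by
  intro matrix _ hD
  rw [pvA_char, pvB_char]
  unfold D_all_col_exists_waldo at hD
  obtain ⟨-, hne, hor⟩ := hD
  intro heq
  have hiff := Bool.eq_iff_iff.mp heq
  simp only [beq_iff_eq] at hiff
  rcases hor with h | h
  · have hw := hiff.mp h; omega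
  · have hl := hiff.mpr h; omega
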